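-- pv_equiv track=rewrite | github.com/Emad78/features_generation | generateFeatures.py | bound_expanding
-- ===== SOURCE A (Python) =====
-- SHORT_TERM = 5
--
-- def bound_expanding(upperBound, lowerBound):
--     expand = [0] * len(upperBound)
--     for i in range(SHORT_TERM, len(upperBound)):
--         diff = -float("Inf")
--         isExpand = 1
--         for j in range(i-SHORT_TERM, i+1):
--             if upperBound[j] - lowerBound[j]>diff:
--                 diff = upperBound[j] - lowerBound[j]
--             else:
--                 isExpand = 0
--         expand[i] = isExpand
--
--     return expand
-- ===== SOURCE B (Python) =====
-- SHORT_TERM = 5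
--
-- def bound_expanding(upperBound, lowerBound):
--     # one-pass sweep maintaining the length of the current strictly-increasing diff streak
--     n = len(upperBound)
--     if n <= SHORT_TERM:
--         return [0] * n
--     out = [0]
--     prev = upperBound[0] - lowerBound[0]
--     run = 1
--     for i in range(1, n):
--         d = upperBound[i] - lowerBound[i]
--         run = run + 1 if d > prev else 1
--         prev = d
--         out.append(1 if run >= SHORT_TERM + 1 else 0)
--     return out
-- ===== Notes on version B (the rewrite author's own statement) =====
-- stated objective: faster
-- what changed: Replaced the nested per-index rescan of a 6-wide window (tracking the window max against -inf) by a single pass that maintains the running length of the current strictly-increasing diff streak and flags run >= 6.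
import Mathlib
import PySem

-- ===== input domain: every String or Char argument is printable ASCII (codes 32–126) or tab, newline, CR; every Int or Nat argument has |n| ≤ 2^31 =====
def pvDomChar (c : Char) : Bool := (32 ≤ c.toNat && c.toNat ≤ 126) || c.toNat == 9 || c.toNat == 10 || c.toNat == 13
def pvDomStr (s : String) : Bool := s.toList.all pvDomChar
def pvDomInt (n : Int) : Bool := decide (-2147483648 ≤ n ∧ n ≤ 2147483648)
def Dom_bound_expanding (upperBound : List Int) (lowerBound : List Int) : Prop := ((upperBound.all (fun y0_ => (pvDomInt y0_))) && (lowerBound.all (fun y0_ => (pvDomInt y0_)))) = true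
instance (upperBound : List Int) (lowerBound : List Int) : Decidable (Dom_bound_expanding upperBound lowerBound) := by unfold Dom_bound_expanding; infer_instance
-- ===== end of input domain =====

-- B replaces A's nested rescan of each 6-wide window by one pass keeping the length of the
-- current strictly-increasing diff streak, computing each diff once (objective: faster, constant factor).

-- ===== PORT A =====
-- literal port of A; list indexing uses pyGetD with default 0, exact on Pre_ (all accessed
-- indices are in range there; Python raises exactly on the inputs Pre_ excludes)
def bound_expanding (upperBound : List Int) (lowerBound : List Int) : List Int :=
  (PySem.List.pyRange 5 (upperBound.length : Int) 1).foldl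
    (fun expand i =>
      let r := (PySem.List.pyRange (i - 5) (i + 1) 1).foldl
        (fun (st : Option Int × Int) j =>
          let d := PySem.List.pyGetD upperBound j 0 - PySem.List.pyGetD lowerBound j 0
          match st.1 with
          | none => (some d, st.2)            -- d > -inf always
          | some m => if d > m then (some d, st.2) else (some m, 0))
        (none, 1)
      expand.set i.toNat r.2)
    (List.replicate upperBound.length 0)

-- ===== PORT B =====
def bound_expanding_alt (upperBound : List Int) (lowerBound : List Int) : List Int :=
  if upperBound.length ≤ 5 then List.replicate upperBound.length 0
  else
    let d0 := PySem.List.pyGetD upperBound 0 0 - PySem.List.pyGetD lowerBound 0 0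
    let st := (PySem.List.pyRange 1 (upperBound.length : Int) 1).foldl
      (fun (st : List Int × Int × Int) i =>
        let d := PySem.List.pyGetD upperBound i 0 - PySem.List.pyGetD lowerBound i 0
        let run := if d > st.2.1 then st.2.2 + 1 else 1
        (st.1 ++ [if run ≥ 6 then (1 : Int) else 0], d, run))
      ([0], d0, 1)
    st.1

-- ===== PRECONDITION & SPEC =====
-- Pre_ excludes exactly the inputs where Python A raises IndexError:
-- more than 5 upper bounds but fewer lower bounds (B raises there too).
def Pre_bound_expanding (upperBound : List Int) (lowerBound : List Int) : Prop :=
  upperBound.length ≤ 5 ∨ upperBound.length ≤ lowerBound.length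
instance (upperBound : List Int) (lowerBound : List Int) : Decidable (Pre_bound_expanding upperBound lowerBound) := by unfold Pre_bound_expanding; infer_instance

def pvWitness_bound_expanding : List Int × List Int := ([1, 2, 4, 7, 11, 16, 22], [0, 0, 0, 0, 0, 0, 0])

def Spec_bound_expanding (upperBound : List Int) (lowerBound : List Int) (out : List Int) : Prop := out = bound_expanding_alt upperBound lowerBound
instance (upperBound : List Int) (lowerBound : List Int) (out : List Int) : Decidable (Spec_bound_expanding upperBound lowerBound out) := by unfold Spec_bound_expanding; infer_instance

-- ===== CLAIM (what is proved, stated in full; the proofs are below) =====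
def Claim_equal_bound_expanding : Prop := ∀ (upperBound : List Int) (lowerBound : List Int), Dom_bound_expanding upperBound lowerBound → Pre_bound_expanding upperBound lowerBound → Spec_bound_expanding upperBound lowerBound (bound_expanding upperBound lowerBound)

-- ===== LEMMAS AND PROOFS =====

-- the diff sequence, indexed by Nat
def dsf (upperBound lowerBound : List Int) (k : Nat) : Int :=
  PySem.List.pyGetD upperBound (k : Int) 0 - PySem.List.pyGetD lowerBound (k : Int) 0

-- length of the strictly-increasing streak of f ending at k
def streak (f : Nat → Int) : Nat → Int
  | 0 => 1
  | k + 1 => if f k < f (k + 1) then streak f k + 1 else 1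

lemma streak_pos (f : Nat → Int) (k : Nat) : 1 ≤ streak f k := by
  induction k with
  | zero => simp [streak]
  | succ k ih => simp only [streak]; split <;> omega

lemma streak_le (f : Nat → Int) (k : Nat) : streak f k ≤ (k : Int) + 1 := by
  induction k with
  | zero => simp [streak]
  | succ k ih => simp only [streak]; split <;> push_cast <;> omega

lemma streak_ge2 (f : Nat → Int) (k : Nat) (c : Int) (hc : 2 ≤ c) :
    c ≤ streak f k ↔ 1 ≤ k ∧ f (k - 1) < f k ∧ c - 1 ≤ streak f (k - 1) := by
  cases k with
  | zero => simp [streak]; omega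
  | succ k =>
    simp only [streak, Nat.add_sub_cancel]
    split
    · constructor
      · intro h; exact ⟨by omega, by assumption, by omega⟩
      · intro ⟨_, _, h⟩; omega
    · constructor
      · intro h; omega
      · intro ⟨_, h, _⟩; exact absurd h (by assumption)

lemma streak_six (f : Nat → Int) (k : Nat) :
    6 ≤ streak f k ↔ 5 ≤ k ∧ f (k - 5) < f (k - 4) ∧ f (k - 4) < f (k - 3) ∧
      f (k - 3) < f (k - 2) ∧ f (k - 2) < f (k - 1) ∧ f (k - 1) < f k := by
  by_cases h5 : 5 ≤ k
  · obtain ⟨m, rfl⟩ : ∃ m, k = m + 5 := ⟨k - 5, by omega⟩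
    rw [streak_ge2 f (m + 5) 6 (by norm_num)]
    rw [show (m + 5 - 1 : Nat) = m + 4 from by omega, show (6 - 1 : Int) = 5 from by norm_num,
        streak_ge2 f (m + 4) 5 (by norm_num)]
    rw [show (m + 4 - 1 : Nat) = m + 3 from by omega, show (5 - 1 : Int) = 4 from by norm_num,
        streak_ge2 f (m + 3) 4 (by norm_num)]
    rw [show (m + 3 - 1 : Nat) = m + 2 from by omega, show (4 - 1 : Int) = 3 from by norm_num,
        streak_ge2 f (m + 2) 3 (by norm_num)]
    rw [show (m + 2 - 1 : Nat) = m + 1 from by omega, show (3 - 1 : Int) = 2 from by norm_num,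
        streak_ge2 f (m + 1) 2 (by norm_num)]
    rw [show (m + 1 - 1 : Nat) = m from by omega, show (m + 5 - 5 : Nat) = m from by omega,
        show (m + 5 - 4 : Nat) = m + 1 from by omega, show (m + 5 - 3 : Nat) = m + 2 from by omega,
        show (m + 5 - 2 : Nat) = m + 3 from by omega]
    have := streak_pos f m
    constructor
    · rintro ⟨_, h1, _, h2, _, h3, _, h4, _, h5, _⟩
      exact ⟨by omega, h5, h4, h3, h2, h1⟩
    · rintro ⟨_, h1, h2, h3, h4, h5⟩
      exact ⟨by omega, h5, by omega, h4, by omega, h3, by omega, h2, by omega, h1, by omega⟩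
  · have := streak_le f k
    constructor
    · intro h; exfalso; omega
    · intro ⟨h, _⟩; omega

-- B's fold invariant
lemma alt_fold (upperBound lowerBound : List Int) (m : Nat) (hm : 1 ≤ m) :
    (PySem.List.pyRange 1 (m : Int) 1).foldl
      (fun (st : List Int × Int × Int) i =>
        let d := PySem.List.pyGetD upperBound i 0 - PySem.List.pyGetD lowerBound i 0
        let run := if d > st.2.1 then st.2.2 + 1 else 1
        (st.1 ++ [if run ≥ 6 then (1 : Int) else 0], d, run))
      ([0], dsf upperBound lowerBound 0, 1)
    = ((List.range m).map
        (fun k => if 6 ≤ streak (dsf upperBound lowerBound) k then (1 : Int) else 0),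
       dsf upperBound lowerBound (m - 1), streak (dsf upperBound lowerBound) (m - 1)) := by
  set f := dsf upperBound lowerBound with hf
  induction m with
  | zero => omega
  | succ m ih =>
    by_cases h1 : 1 ≤ m
    · have hcast : ((m : Int) + 1) = ((m + 1 : Nat) : Int) := by push_cast; ring
      rw [← hcast, PySem.List.pyRange_one_succ_right (by exact_mod_cast h1),
          List.foldl_append, ih h1]
      simp only [List.foldl_cons, List.foldl_nil]
      obtain ⟨m', rfl⟩ : ∃ m', m = m' + 1 := ⟨m - 1, by omega⟩
      have hd : PySem.List.pyGetD upperBound ((m' + 1 : Nat) : Int) 0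
          - PySem.List.pyGetD lowerBound ((m' + 1 : Nat) : Int) 0 = f (m' + 1) := by
        simp [hf, dsf]
      rw [hd]
      simp only [Nat.add_sub_cancel, Prod.mk.injEq]
      refine ⟨?_, by trivial, ?_⟩
      · by_cases hc : f m' < f (m' + 1) <;> simp [streak, hc, List.range_succ]
      · by_cases hc : f m' < f (m' + 1) <;> simp [streak, hc]
    · have hm0 : m = 0 := by omega
      subst hm0
      rw [PySem.List.pyRange_one_eq_nil (by omega)]
      simp [streak, List.range_succ]

-- characterization of B for long inputs
lemma alt_spec (upperBound lowerBound : List Int) (h : 5 < upperBound.length) :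
    bound_expanding_alt upperBound lowerBound
    = (List.range upperBound.length).map
        (fun k => if 6 ≤ streak (dsf upperBound lowerBound) k then (1 : Int) else 0) := by
  unfold bound_expanding_alt
  rw [if_neg (by omega)]
  have hd0 : PySem.List.pyGetD upperBound 0 0 - PySem.List.pyGetD lowerBound 0 0
      = dsf upperBound lowerBound 0 := by simp [dsf]
  simp only [hd0]
  rw [alt_fold upperBound lowerBound upperBound.length (by omega)]

-- A's inner window flag
-- one step of A's inner loop, on the diff value
def stepV (st : Option Int × Int) (d : Int) : Option Int × Int :=
  match st.1 with
  | none => (some d, st.2)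
  | some mx => if d > mx then (some d, st.2) else (some mx, 0)

lemma stepV_zero (vs : List Int) (mx : Int) : (vs.foldl stepV (some mx, 0)).2 = 0 := by
  induction vs generalizing mx with
  | nil => rfl
  | cons d tl ih =>
    simp only [List.foldl_cons, stepV]
    split_ifs <;> exact ih _

lemma fold6v (a b c d e g : Int) :
    (([a, b, c, d, e, g] : List Int).foldl stepV (none, 1)).2
    = if a < b ∧ b < c ∧ c < d ∧ d < e ∧ e < g then 1 else 0 := by
  rw [List.foldl_cons, show stepV (none, 1) a = (some a, 1) from rfl, List.foldl_cons]
  by_cases h1 : a < b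
  · rw [show stepV (some a, 1) b = (some b, 1) from by simp [stepV, h1], List.foldl_cons]
    by_cases h2 : b < c
    · rw [show stepV (some b, 1) c = (some c, 1) from by simp [stepV, h2], List.foldl_cons]
      by_cases h3 : c < d
      · rw [show stepV (some c, 1) d = (some d, 1) from by simp [stepV, h3], List.foldl_cons]
        by_cases h4 : d < e
        · rw [show stepV (some d, 1) e = (some e, 1) from by simp [stepV, h4], List.foldl_cons]
          by_cases h5 : e < g
          · rw [show stepV (some e, 1) g = (some g, 1) from by simp [stepV, h5], List.foldl_nil,
                if_pos ⟨h1, h2, h3, h4, h5⟩]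
          · rw [show stepV (some e, 1) g = (some e, 0) from by simp [stepV, h5], List.foldl_nil,
                if_neg (by tauto)]
        · rw [show stepV (some d, 1) e = (some d, 0) from by simp [stepV, h4], stepV_zero,
              if_neg (by tauto)]
      · rw [show stepV (some c, 1) d = (some c, 0) from by simp [stepV, h3], stepV_zero,
            if_neg (by tauto)]
    · rw [show stepV (some b, 1) c = (some b, 0) from by simp [stepV, h2], stepV_zero,
          if_neg (by tauto)]
  · rw [show stepV (some a, 1) b = (some a, 0) from by simp [stepV, h1], stepV_zero,
        if_neg (by tauto)]

lemma inner_flag (upperBound lowerBound : List Int) (m : Nat) (h5m : 5 ≤ m) :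
    ((PySem.List.pyRange ((m : Int) - 5) ((m : Int) + 1) 1).foldl
      (fun (st : Option Int × Int) j =>
        let d := PySem.List.pyGetD upperBound j 0 - PySem.List.pyGetD lowerBound j 0
        match st.1 with
        | none => (some d, st.2)
        | some mx => if d > mx then (some d, st.2) else (some mx, 0))
      (none, 1)).2
    = (if 6 ≤ streak (dsf upperBound lowerBound) m then (1 : Int) else 0) := by
  set f := dsf upperBound lowerBound with hf
  have hexp : PySem.List.pyRange ((m : Int) - 5) ((m : Int) + 1) 1
      = [(m : Int) - 5, (m : Int) - 4, (m : Int) - 3, (m : Int) - 2, (m : Int) - 1, (m : Int)] := by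
    rw [PySem.List.pyRange_one_cons (by omega), show (m : Int) - 5 + 1 = (m : Int) - 4 from by ring,
        PySem.List.pyRange_one_cons (by omega), show (m : Int) - 4 + 1 = (m : Int) - 3 from by ring,
        PySem.List.pyRange_one_cons (by omega), show (m : Int) - 3 + 1 = (m : Int) - 2 from by ring,
        PySem.List.pyRange_one_cons (by omega), show (m : Int) - 2 + 1 = (m : Int) - 1 from by ring,
        PySem.List.pyRange_one_cons (by omega), show (m : Int) - 1 + 1 = (m : Int) from by ring,
        PySem.List.pyRange_one_cons (by omega), PySem.List.pyRange_one_eq_nil (by omega)]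
  rw [hexp]
  have hg : ∀ c : Nat, c ≤ 5 →
      PySem.List.pyGetD upperBound ((m : Int) - (c : Int)) 0
        - PySem.List.pyGetD lowerBound ((m : Int) - (c : Int)) 0 = f (m - c) := by
    intro c hc
    have hcc : ((m : Int) - (c : Int)) = ((m - c : Nat) : Int) := by omega
    rw [hcc, hf]; rfl
  have h0 : PySem.List.pyGetD upperBound (m : Int) 0
      - PySem.List.pyGetD lowerBound (m : Int) 0 = f m := by simpa using hg 0 (by omega)
  have h1 : PySem.List.pyGetD upperBound ((m : Int) - 1) 0
      - PySem.List.pyGetD lowerBound ((m : Int) - 1) 0 = f (m - 1) := by simpa using hg 1 (by omega)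
  have h2 : PySem.List.pyGetD upperBound ((m : Int) - 2) 0
      - PySem.List.pyGetD lowerBound ((m : Int) - 2) 0 = f (m - 2) := by simpa using hg 2 (by omega)
  have h3 : PySem.List.pyGetD upperBound ((m : Int) - 3) 0
      - PySem.List.pyGetD lowerBound ((m : Int) - 3) 0 = f (m - 3) := by simpa using hg 3 (by omega)
  have h4 : PySem.List.pyGetD upperBound ((m : Int) - 4) 0
      - PySem.List.pyGetD lowerBound ((m : Int) - 4) 0 = f (m - 4) := by simpa using hg 4 (by omega)
  have h5 : PySem.List.pyGetD upperBound ((m : Int) - 5) 0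
      - PySem.List.pyGetD lowerBound ((m : Int) - 5) 0 = f (m - 5) := by simpa using hg 5 (by omega)
  have hbody : ((([(m : Int) - 5, (m : Int) - 4, (m : Int) - 3, (m : Int) - 2, (m : Int) - 1,
      (m : Int)] : List Int).foldl
      (fun (st : Option Int × Int) j =>
        let d := PySem.List.pyGetD upperBound j 0 - PySem.List.pyGetD lowerBound j 0
        match st.1 with
        | none => (some d, st.2)
        | some mx => if d > mx then (some d, st.2) else (some mx, 0))
      (none, 1)).2)
      = (([f (m - 5), f (m - 4), f (m - 3), f (m - 2), f (m - 1), f m] : List Int).foldl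
          stepV (none, 1)).2 := by
    simp only [List.foldl_cons, List.foldl_nil, stepV, h0, h1, h2, h3, h4, h5]
  rw [hbody, fold6v]
  by_cases hw : f (m - 5) < f (m - 4) ∧ f (m - 4) < f (m - 3) ∧ f (m - 3) < f (m - 2) ∧
      f (m - 2) < f (m - 1) ∧ f (m - 1) < f m
  · rw [if_pos hw, if_pos ((streak_six f m).2 ⟨h5m, hw⟩)]
  · rw [if_neg hw, if_neg (fun hs => hw ((streak_six f m).1 hs).2)]

-- A's outer fold invariant
lemma a_fold (upperBound lowerBound : List Int) (m : Nat) (hm : 5 ≤ m)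
    (hmn : m ≤ upperBound.length) :
    (PySem.List.pyRange 5 (m : Int) 1).foldl
      (fun expand i =>
        let r := (PySem.List.pyRange (i - 5) (i + 1) 1).foldl
          (fun (st : Option Int × Int) j =>
            let d := PySem.List.pyGetD upperBound j 0 - PySem.List.pyGetD lowerBound j 0
            match st.1 with
            | none => (some d, st.2)
            | some mx => if d > mx then (some d, st.2) else (some mx, 0))
          (none, 1)
        expand.set i.toNat r.2)
      (List.replicate upperBound.length 0)
    = (List.range upperBound.length).map
        (fun k => if k < m ∧ 6 ≤ streak (dsf upperBound lowerBound) k then (1 : Int) else 0) := by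
  induction m with
  | zero => omega
  | succ m ih =>
    by_cases h5 : 5 ≤ m
    · have hcast : ((m : Int) + 1) = ((m + 1 : Nat) : Int) := by push_cast; ring
      rw [← hcast, PySem.List.pyRange_one_succ_right (by exact_mod_cast h5),
          List.foldl_append, ih h5 (by omega)]
      simp only [List.foldl_cons, List.foldl_nil]
      rw [inner_flag upperBound lowerBound m h5]
      apply List.ext_getElem
      · simp
      · intro k hk1 hk2
        simp only [List.getElem_set, List.getElem_map, List.getElem_range, Int.toNat_natCast,
          List.length_map, List.length_range] at hk1 hk2 ⊢
        by_cases hkm : m = k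
        · subst hkm
          split_ifs <;> omega
        · rw [if_neg hkm]
          split_ifs <;> omega
    · rw [PySem.List.pyRange_one_eq_nil (by omega)]
      simp only [List.foldl_nil]
      apply List.ext_getElem
      · simp
      · intro k hk1 hk2
        simp only [List.length_replicate] at hk1
        have hsl := streak_le (dsf upperBound lowerBound) k
        simp only [List.getElem_replicate, List.getElem_map, List.getElem_range]
        split_ifs with h
        · exfalso; obtain ⟨hka, hkb⟩ := h; omega
        · rfl

-- ===== VERDICT (by name: the statement is the Claim_ definition above) =====
theorem bound_expanding_spec : Claim_equal_bound_expanding := by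
  intro upperBound lowerBound _ _
  unfold Spec_bound_expanding
  by_cases h : upperBound.length ≤ 5
  · unfold bound_expanding bound_expanding_alt
    rw [if_pos h, PySem.List.pyRange_one_eq_nil (by omega)]
    rfl
  · rw [alt_spec upperBound lowerBound (by omega)]
    unfold bound_expanding
    rw [a_fold upperBound lowerBound upperBound.length (by omega) le_rfl]
    apply List.map_congr_left
    intro k hk
    rw [List.mem_range] at hk
    by_cases hs : 6 ≤ streak (dsf upperBound lowerBound) k
    · rw [if_pos ⟨hk, hs⟩, if_pos hs]
    · rw [if_neg (by tauto), if_neg hs]
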